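-- pv_equiv track=rewrite | github.com/skaushikk/Mini_projects | int_questions.py | arr_min
-- ===== SOURCE A (Python) =====
-- def arr_min(A):
--     A_sorted = sorted(A)
--     ans=[]
--     _min = 2**31
--     for i in range(len(A)-1):
--         dif = abs(A[i+1]-A[i])
--         if dif < _min:
--             _min = dif
--             ans = [[A[i], A[i+1]]]
--         elif dif==_min:
--             ans.append([A[i], A[i+1]])
--     return ans
-- ===== SOURCE B (Python) =====
-- def arr_min(A):
--     pairs = list(zip(A, A[1:]))
--     if not pairs:
--         return []
--     m = min(abs(b - a) for a, b in pairs)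
--     return [[a, b] for a, b in pairs if abs(b - a) == m]
-- ===== Notes on version B (the rewrite author's own statement) =====
-- stated objective: simpler
-- what changed: Replaces the single-pass running-minimum loop with reset/append state by a two-pass decomposition (zip adjacent pairs, take the true minimum absolute difference, then filter), dropping the dead sorted(A) line and the 2**31 sentinel cap.
-- intended difference: On lists with at least two elements whose every adjacent absolute difference exceeds 2**31, A's sentinel _min=2**31 is never beaten so A returns the empty list, while B returns the pairs achieving the true minimal adjacent difference, which is the intended answer. — e.g. on arr_min([-2147483648, 2147483648]): A returns [], B returns [[-2147483648, 2147483648]]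
import Mathlib
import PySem

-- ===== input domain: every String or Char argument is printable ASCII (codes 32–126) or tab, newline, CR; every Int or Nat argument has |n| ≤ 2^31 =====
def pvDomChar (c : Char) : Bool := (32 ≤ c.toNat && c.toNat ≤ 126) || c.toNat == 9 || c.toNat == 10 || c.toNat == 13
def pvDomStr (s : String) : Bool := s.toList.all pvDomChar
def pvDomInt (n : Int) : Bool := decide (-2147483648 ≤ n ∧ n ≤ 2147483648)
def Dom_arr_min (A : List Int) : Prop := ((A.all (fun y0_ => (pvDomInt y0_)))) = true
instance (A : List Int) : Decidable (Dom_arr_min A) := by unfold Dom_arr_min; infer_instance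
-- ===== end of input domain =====

-- B replaces A's running-minimum loop by a two-pass min-then-filter over adjacent pairs (simpler);
-- inside D_ (all adjacent differences above A's 2**31 sentinel) B returns the intended pairs where A returns an empty result.

-- ===== PORT A =====
def arr_min (A : List Int) : List (List Int) :=
  let _A_sorted := PySem.List.sorted A (fun x => x) false  -- A_sorted = sorted(A) (dead)
  let res := (PySem.List.pyRange 0 ((A.length : Int) - 1) 1).foldl
    (fun (st : Int × List (List Int)) i =>
      let dif := |PySem.List.pyGetD A (i + 1) 0 - PySem.List.pyGetD A i 0|
      if dif < st.1 then
        (dif, [[PySem.List.pyGetD A i 0, PySem.List.pyGetD A (i + 1) 0]])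
      else if dif = st.1 then
        (st.1, st.2 ++ [[PySem.List.pyGetD A i 0, PySem.List.pyGetD A (i + 1) 0]])
      else st)
    ((2 : Int) ^ 31, ([] : List (List Int)))
  res.2

-- ===== PORT B =====
def arr_min_alt (A : List Int) : List (List Int) :=
  let pairs := A.zip A.tail  -- zip(A, A[1:]): the slice A[1:] is the tail (exact)
  match PySem.List.min? (pairs.map (fun p => |p.2 - p.1|)) (fun x => x) with
  | none => []
  | some m => (pairs.filter (fun p => decide (|p.2 - p.1| = m))).map (fun p => [p.1, p.2])

-- ===== PRECONDITION & SPEC =====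
-- On lists with ≥ 2 elements whose every adjacent absolute difference exceeds 2**31, A's sentinel
-- _min = 2**31 is never beaten and A returns an empty result, while B returns the pairs achieving the true
-- minimal adjacent difference, which is the intended answer.
def D_arr_min (A : List Int) : Prop :=
  2 ≤ A.length ∧ ∀ p ∈ A.zip A.tail, (2 : Int) ^ 31 < |p.2 - p.1|
instance (A : List Int) : Decidable (D_arr_min A) := by unfold D_arr_min; infer_instance

def Spec_arr_min (A : List Int) (out : List (List Int)) : Prop := ¬ D_arr_min A → out = arr_min_alt A
instance (A : List Int) (out : List (List Int)) : Decidable (Spec_arr_min A out) := by unfold Spec_arr_min; infer_instance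

def pvDiffWitness_arr_min : List Int := [-2147483648, 2147483648]
def pvDiffWitnessOut_arr_min : (List (List Int)) × (List (List Int)) :=
  ([], [[-2147483648, 2147483648]])

-- ===== CLAIM (what is proved, stated in full; the proofs are below) =====
def Claim_unchanged_arr_min : Prop := ∀ (A : List Int), Dom_arr_min A → Spec_arr_min A (arr_min A)
def Claim_changed_arr_min : Prop := Dom_arr_min (pvDiffWitness_arr_min) ∧ D_arr_min (pvDiffWitness_arr_min) ∧ arr_min (pvDiffWitness_arr_min) = pvDiffWitnessOut_arr_min.1 ∧ arr_min_alt (pvDiffWitness_arr_min) = pvDiffWitnessOut_arr_min.2 ∧ pvDiffWitnessOut_arr_min.1 ≠ pvDiffWitnessOut_arr_min.2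
def Claim_exact_arr_min : Prop := ∀ (A : List Int), Dom_arr_min A → D_arr_min A → arr_min A ≠ arr_min_alt A

-- ===== LEMMAS AND PROOFS =====

-- A's loop body, on a pair of adjacent elements.
def pstep (st : Int × List (List Int)) (p : Int × Int) : Int × List (List Int) :=
  let dif := |p.2 - p.1|
  if dif < st.1 then (dif, [[p.1, p.2]])
  else if dif = st.1 then (st.1, st.2 ++ [[p.1, p.2]])
  else st

-- the index range of A's loop, mapped to the pairs it reads, is exactly zip(A, tail A)
lemma map_range_pairs (A : List Int) :
    (PySem.List.pyRange 0 ((A.length : Int) - 1) 1).map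
      (fun i => (PySem.List.pyGetD A i 0, PySem.List.pyGetD A (i + 1) 0))
      = A.zip A.tail := by
  rcases A with _ | ⟨a, t⟩
  · simp [PySem.List.pyRange_one_eq_nil]
  · apply List.ext_getElem
    · simp only [List.length_map, PySem.List.length_pyRange_one, List.length_zip,
        List.length_cons, List.length_tail]
      omega
    · intro k h1 h2
      have hk : k < t.length := by
        simpa [PySem.List.length_pyRange_one] using h1
      have hk1 : k < (a :: t).length := by simp; omega
      have hk2 : k + 1 < (a :: t).length := by simp; omega
      simp only [List.getElem_map, PySem.List.getElem_pyRange_one, List.getElem_zip,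
        List.tail_cons]
      have e2 : (0 : Int) + (k : Int) + 1 = (((k + 1 : Nat)) : Int) := by push_cast; ring
      have e1 : (0 : Int) + (k : Int) = ((k : Nat) : Int) := by omega
      rw [e2, e1, PySem.List.pyGetD_natCast, PySem.List.pyGetD_natCast,
        List.getD_eq_getElem _ _ hk1, List.getD_eq_getElem _ _ hk2]
      simp

lemma foldl_min_init_comm (l : List Int) (a : Int) :
    ∀ b, l.foldl min (min a b) = min a (l.foldl min b) := by
  induction l with
  | nil => intro b; rfl
  | cons y t ih =>
      intro b
      simp only [List.foldl_cons]
      rw [min_assoc, ih]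

-- running projected minimum
lemma proj_min_le (t : List (Int × Int)) (a : Int) :
    t.foldl (fun acc p => min acc |p.2 - p.1|) a ≤ a ∧
      ∀ p ∈ t, t.foldl (fun acc p => min acc |p.2 - p.1|) a ≤ |p.2 - p.1| := by
  induction t generalizing a with
  | nil => simp
  | cons q t ih =>
      simp only [List.foldl_cons, List.mem_cons]
      refine ⟨le_trans (ih (min a |q.2 - q.1|)).1 (min_le_left _ _), ?_⟩
      rintro p (rfl | hp)
      · exact le_trans (ih (min a |p.2 - p.1|)).1 (min_le_right _ _)
      · exact (ih (min a |q.2 - q.1|)).2 p hp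

lemma proj_min_mem (t : List (Int × Int)) (a : Int) :
    t.foldl (fun acc p => min acc |p.2 - p.1|) a = a ∨
      ∃ p ∈ t, |p.2 - p.1| = t.foldl (fun acc p => min acc |p.2 - p.1|) a := by
  induction t generalizing a with
  | nil => simp
  | cons q t ih =>
      simp only [List.foldl_cons, List.mem_cons]
      rcases ih (min a |q.2 - q.1|) with h | ⟨p, hp, he⟩
      · rw [h]
        rcases le_total a |q.2 - q.1| with hle | hle
        · left; exact min_eq_left hle
        · right; exact ⟨q, Or.inl rfl, (min_eq_right hle).symm⟩
      · right; exact ⟨p, Or.inr hp, he⟩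

-- the characterisation of A's loop state
lemma fold_pstep (ps : List (Int × Int)) (m : Int) (ans : List (List Int)) :
    ps.foldl pstep (m, ans) =
      (ps.foldl (fun acc p => min acc |p.2 - p.1|) m,
       (if ps.foldl (fun acc p => min acc |p.2 - p.1|) m = m then ans else [])
         ++ (ps.filter (fun p =>
              decide (|p.2 - p.1| = ps.foldl (fun acc p => min acc |p.2 - p.1|) m))).map
            (fun p => [p.1, p.2])) := by
  induction ps generalizing m ans with
  | nil => simp
  | cons q t ih =>
      have hle := (proj_min_le t (min m |q.2 - q.1|)).1
      simp only [List.foldl_cons, List.filter_cons]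
      by_cases h1 : |q.2 - q.1| < m
      · have hstep : pstep (m, ans) q = (|q.2 - q.1|, [[q.1, q.2]]) := by
          simp [pstep, h1]
        rw [hstep, ih]
        have hmin : min m |q.2 - q.1| = |q.2 - q.1| := min_eq_right (le_of_lt h1)
        rw [hmin] at hle
        simp only [hmin]
        have hne : t.foldl (fun acc p => min acc |p.2 - p.1|) |q.2 - q.1| ≠ m := by omega
        by_cases h2 : t.foldl (fun acc p => min acc |p.2 - p.1|) |q.2 - q.1| = |q.2 - q.1|
        · simp [h2]
          exact fun h => absurd h (by omega)
        · have : ¬ (|q.2 - q.1| = t.foldl (fun acc p => min acc |p.2 - p.1|) |q.2 - q.1|) :=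
            fun h => h2 h.symm
          simp [h2, hne, this]
      · by_cases h2 : |q.2 - q.1| = m
        · have hstep : pstep (m, ans) q = (m, ans ++ [[q.1, q.2]]) := by
            simp [pstep, h2]
          rw [hstep, ih]
          have hmin : min m |q.2 - q.1| = m := min_eq_left (le_of_eq h2.symm)
          rw [hmin] at hle
          simp only [hmin]
          by_cases h3 : t.foldl (fun acc p => min acc |p.2 - p.1|) m = m
          · simp [h3, h2]
          · have : ¬ (|q.2 - q.1| = t.foldl (fun acc p => min acc |p.2 - p.1|) m) := by
              rw [h2]; exact fun h => h3 h.symm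
            simp [h3, this]
        · have hstep : pstep (m, ans) q = (m, ans) := by
            simp [pstep, h1, h2]
          rw [hstep, ih]
          have hmin : min m |q.2 - q.1| = m := min_eq_left (not_lt.mp h1)
          rw [hmin] at hle
          simp only [hmin]
          have : ¬ (|q.2 - q.1| = t.foldl (fun acc p => min acc |p.2 - p.1|) m) := by omega
          simp [this]

-- A's result, in terms of the pair list
lemma arr_min_eq (A : List Int) :
    arr_min A =
      ((A.zip A.tail).filter (fun p =>
        decide (|p.2 - p.1| =
          (A.zip A.tail).foldl (fun acc p => min acc |p.2 - p.1|) ((2 : Int) ^ 31)))).map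
        (fun p => [p.1, p.2]) := by
  unfold arr_min
  have hbody :
      (PySem.List.pyRange 0 ((A.length : Int) - 1) 1).foldl
        (fun (st : Int × List (List Int)) i =>
          let dif := |PySem.List.pyGetD A (i + 1) 0 - PySem.List.pyGetD A i 0|
          if dif < st.1 then
            (dif, [[PySem.List.pyGetD A i 0, PySem.List.pyGetD A (i + 1) 0]])
          else if dif = st.1 then
            (st.1, st.2 ++ [[PySem.List.pyGetD A i 0, PySem.List.pyGetD A (i + 1) 0]])
          else st)
        ((2 : Int) ^ 31, ([] : List (List Int)))
      = (A.zip A.tail).foldl pstep ((2 : Int) ^ 31, ([] : List (List Int))) := by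
    rw [← map_range_pairs A, List.foldl_map]
    rfl
  simp only [hbody, fold_pstep]
  split <;> simp

theorem arr_min_unchanged_proof : ∀ (A : List Int), ¬ D_arr_min A → arr_min A = arr_min_alt A := by
  intro A hD
  rw [arr_min_eq]
  unfold arr_min_alt
  rcases hzip : A.zip A.tail with _ | ⟨q, t⟩
  · simp only [List.map_nil, List.filter_nil]
    rfl
  · have hlen : 2 ≤ A.length := by
      have : (A.zip A.tail).length = min A.length A.tail.length := List.length_zip
      rw [hzip] at this
      simp at this
      omega
    have hex : ∃ p ∈ A.zip A.tail, |p.2 - p.1| ≤ (2 : Int) ^ 31 := by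
      unfold D_arr_min at hD
      push_neg at hD
      exact hD hlen
    simp only [List.map_cons, PySem.List.min?_id_cons]
    set m0 := (t.map (fun p => |p.2 - p.1|)).foldl min (|q.2 - q.1|) with hm0
    have hm0' : m0 = t.foldl (fun acc p => min acc |p.2 - p.1|) (|q.2 - q.1|) := by
      rw [hm0, List.foldl_map]
    have hex' : m0 ≤ (2 : Int) ^ 31 := by
      rcases hex with ⟨p, hp, hple⟩
      rw [hzip] at hp
      rcases List.mem_cons.mp hp with rfl | hpt
      · calc m0 ≤ |p.2 - p.1| := by rw [hm0']; exact (proj_min_le t _).1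
        _ ≤ _ := hple
      · calc m0 ≤ |p.2 - p.1| := by rw [hm0']; exact (proj_min_le t _).2 p hpt
        _ ≤ _ := hple
    have key : t.foldl (fun acc p => min acc |p.2 - p.1|) (min ((2 : Int) ^ 31) |q.2 - q.1|)
        = min ((2 : Int) ^ 31) m0 := by
      have h := foldl_min_init_comm (t.map (fun p => |p.2 - p.1|)) ((2 : Int) ^ 31) (|q.2 - q.1|)
      simpa [List.foldl_map, ← hm0'] using h
    have hM : (q :: t).foldl (fun acc p => min acc |p.2 - p.1|) ((2 : Int) ^ 31) = m0 := by
      simp only [List.foldl_cons]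
      rw [key]
      exact min_eq_right hex'
    rw [hM]

theorem arr_min_exact_proof : ∀ (A : List Int), D_arr_min A → arr_min A ≠ arr_min_alt A := by
  intro A hD
  rw [arr_min_eq]
  unfold arr_min_alt
  obtain ⟨hlen, hall⟩ := hD
  rcases hzip : A.zip A.tail with _ | ⟨q, t⟩
  · exfalso
    have : (A.zip A.tail).length = min A.length A.tail.length := List.length_zip
    rw [hzip] at this
    simp at this
    omega
  · simp only [List.map_cons, PySem.List.min?_id_cons]
    set m0 := (t.map (fun p => |p.2 - p.1|)).foldl min (|q.2 - q.1|) with hm0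
    have hm0' : m0 = t.foldl (fun acc p => min acc |p.2 - p.1|) (|q.2 - q.1|) := by
      rw [hm0, List.foldl_map]
    -- m0 is one of the differences, hence > 2^31
    have hm0mem : ∃ p ∈ q :: t, |p.2 - p.1| = m0 := by
      rcases proj_min_mem t (|q.2 - q.1|) with h | ⟨p, hp, he⟩
      · exact ⟨q, List.mem_cons_self, by rw [hm0', h]⟩
      · exact ⟨p, List.mem_cons_of_mem _ hp, by rw [hm0']; exact he⟩
    obtain ⟨p0, hp0, hp0e⟩ := hm0mem
    have hm0big : (2 : Int) ^ 31 < m0 := by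
      rw [← hp0e]; exact hall p0 (by rw [hzip]; exact hp0)
    -- A's running minimum stays at the sentinel
    have key : t.foldl (fun acc p => min acc |p.2 - p.1|) (min ((2 : Int) ^ 31) |q.2 - q.1|)
        = min ((2 : Int) ^ 31) m0 := by
      have h := foldl_min_init_comm (t.map (fun p => |p.2 - p.1|)) ((2 : Int) ^ 31) (|q.2 - q.1|)
      simpa [List.foldl_map, ← hm0'] using h
    have hM : (q :: t).foldl (fun acc p => min acc |p.2 - p.1|) ((2 : Int) ^ 31)
        = (2 : Int) ^ 31 := by
      simp only [List.foldl_cons]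
      rw [key]
      exact min_eq_left (le_of_lt hm0big)
    rw [hM]
    -- left side: filter of (diff = 2^31) is empty
    have hfilt : (q :: t).filter (fun p => decide (|p.2 - p.1| = (2 : Int) ^ 31)) = [] := by
      rw [List.filter_eq_nil_iff]
      intro p hp
      have := hall p (by rw [hzip]; exact hp)
      simp only [decide_eq_true_eq]
      omega
    rw [hfilt]
    -- right side: nonempty
    have hne : ((q :: t).filter (fun p => decide (|p.2 - p.1| = m0))).map
        (fun p => [p.1, p.2]) ≠ [] := by
      simp only [ne_eq, List.map_eq_nil_iff, List.filter_eq_nil_iff]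
      push_neg
      exact ⟨p0, hp0, by simpa using hp0e⟩
    simp only [List.map_nil]
    exact fun h => hne h.symm

-- ===== VERDICT (by name: the statement is the Claim_ definition above) =====
theorem arr_min_spec : Claim_unchanged_arr_min := by
  intro A _ hD
  exact arr_min_unchanged_proof A hD

theorem arr_min_changed : Claim_changed_arr_min := by
  unfold Claim_changed_arr_min; decide

theorem arr_min_tight : Claim_exact_arr_min := by
  intro A _ hD
  exact arr_min_exact_proof A hD
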